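-- pv_equiv track=rewrite | github.com/jhdavis789/apple-availability-dashboard | availability_matrix_csv_rest.py | _zip_to_label
-- ===== SOURCE A (Python) =====
-- CITIES = {
--     "NYC": "10001", "LA": "90001", "SF": "94102", "Austin": "78701",
--     "Boston": "02139", "Chicago": "60601", "Houston": "77001", "Phoenix": "85001",
--     "Seattle": "98101", "Miami": "33101", "Denver": "80201", "Atlanta": "30301",
-- }
--
-- OVERFLOW_ZIPS = {
--     "NYC": ["11201", "10314", "10801", "11501"],  # Brooklyn, Staten Island, Westchester, LI
--     "LA":  ["92602"],                              # Irvine/OC (+7 stores: South Coast Plaza, Fashion Island, etc.)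
--     "SF":  ["95110"],                              # San Jose (+4 stores: Valley Fair, Apple Park, etc.)
-- }
--
-- def _zip_to_label(zip_code: str) -> str:
--     """Map a zip code back to its city label for raw response tagging."""
--     for city, z in CITIES.items():
--         if z == zip_code:
--             return city
--     for parent_city, overflow_list in OVERFLOW_ZIPS.items():
--         if zip_code in overflow_list:
--             return f"{parent_city}_overflow"
--     return "unknown"
-- ===== SOURCE B (Python) =====
-- # Flat, hand-flattened reverse lookup table: zip -> label, one dict .get, no loops.
-- _REVERSE = {
--     "10001": "NYC", "90001": "LA", "94102": "SF", "78701": "Austin",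
--     "02139": "Boston", "60601": "Chicago", "77001": "Houston", "85001": "Phoenix",
--     "98101": "Seattle", "33101": "Miami", "80201": "Denver", "30301": "Atlanta",
--     "11201": "NYC_overflow", "10314": "NYC_overflow", "10801": "NYC_overflow",
--     "11501": "NYC_overflow", "92602": "LA_overflow", "95110": "SF_overflow",
-- }
--
-- def _zip_to_label(zip_code: str) -> str:
--     """Map a zip code back to its city label via a flat precomputed reverse table."""
--     return _REVERSE.get(zip_code, "unknown")
-- ===== Notes on version B (the rewrite author's own statement) =====
-- stated objective: idiomatic
-- what changed: Replaces A's two sequential scans (over CITIES and over each OVERFLOW_ZIPS list) with a flat precomputed zip-to-label reverse table, so the function body is a single dict .get with no loops at all.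
import Mathlib
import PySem

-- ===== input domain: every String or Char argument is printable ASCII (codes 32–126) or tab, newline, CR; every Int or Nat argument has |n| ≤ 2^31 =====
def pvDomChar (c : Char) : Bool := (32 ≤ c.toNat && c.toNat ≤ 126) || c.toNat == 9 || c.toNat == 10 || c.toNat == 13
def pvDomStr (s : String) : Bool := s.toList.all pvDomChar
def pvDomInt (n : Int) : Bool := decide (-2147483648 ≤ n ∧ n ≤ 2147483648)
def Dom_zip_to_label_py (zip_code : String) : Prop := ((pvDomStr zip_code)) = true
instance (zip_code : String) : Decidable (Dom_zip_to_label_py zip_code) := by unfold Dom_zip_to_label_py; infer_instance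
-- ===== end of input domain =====

-- B replaces A's two sequential scans with a single flat precomputed reverse table and one lookup; idiomatic, same result.

-- ===== PORT A =====
def pvCITIES : List (String × String) :=
  [("NYC", "10001"), ("LA", "90001"), ("SF", "94102"), ("Austin", "78701"),
   ("Boston", "02139"), ("Chicago", "60601"), ("Houston", "77001"), ("Phoenix", "85001"),
   ("Seattle", "98101"), ("Miami", "33101"), ("Denver", "80201"), ("Atlanta", "30301")]

def pvOVERFLOW_ZIPS : List (String × List String) :=
  [("NYC", ["11201", "10314", "10801", "11501"]),
   ("LA",  ["92602"]),
   ("SF",  ["95110"])]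

-- first loop of A: 'for city, z in CITIES.items(): if z == zip_code: return city'
def pvScanCities : List (String × String) → String → Option String
  | [], _ => none
  | (city, z) :: rest, zc => if z == zc then some city else pvScanCities rest zc

-- second loop of A: 'for parent_city, overflow_list in OVERFLOW_ZIPS.items(): if zip_code in overflow_list: …'
def pvScanOverflow : List (String × List String) → String → Option String
  | [], _ => none
  | (parent, lst) :: rest, zc =>
      if lst.contains zc then some (parent ++ "_overflow") else pvScanOverflow rest zc

def zip_to_label_py (zip_code : String) : String :=
  match pvScanCities pvCITIES zip_code with
  | some city => city
  | none =>
    match pvScanOverflow pvOVERFLOW_ZIPS zip_code with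
    | some lbl => lbl
    | none => "unknown"

-- ===== PORT B =====
-- _REVERSE: the hand-flattened literal dict of Source B, zip -> label
def pvREVERSE : PySem.Dict String String := PySem.Dict.mk
  [("10001", "NYC"), ("90001", "LA"), ("94102", "SF"), ("78701", "Austin"),
   ("02139", "Boston"), ("60601", "Chicago"), ("77001", "Houston"), ("85001", "Phoenix"),
   ("98101", "Seattle"), ("33101", "Miami"), ("80201", "Denver"), ("30301", "Atlanta"),
   ("11201", "NYC_overflow"), ("10314", "NYC_overflow"), ("10801", "NYC_overflow"),
   ("11501", "NYC_overflow"), ("92602", "LA_overflow"), ("95110", "SF_overflow")]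

def zip_to_label_py_alt (zip_code : String) : String :=
  pvREVERSE.getD zip_code "unknown"

-- ===== PRECONDITION & SPEC =====
def Spec_zip_to_label_py (zip_code : String) (out : String) : Prop := out = zip_to_label_py_alt zip_code
instance (zip_code : String) (out : String) : Decidable (Spec_zip_to_label_py zip_code out) := by unfold Spec_zip_to_label_py; infer_instance

-- ===== CLAIM =====
def Claim_equal_zip_to_label_py : Prop := ∀ (zip_code : String), Dom_zip_to_label_py zip_code → Spec_zip_to_label_py zip_code (zip_to_label_py zip_code)

-- ===== LEMMAS AND PROOFS =====

-- ===== VERDICT =====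
theorem zip_to_label_py_spec : Claim_equal_zip_to_label_py := by
  intro zc _
  unfold Spec_zip_to_label_py
  rcases eq_or_ne zc "10001" with rfl | h0
  · decide
  rcases eq_or_ne zc "90001" with rfl | h1
  · decide
  rcases eq_or_ne zc "94102" with rfl | h2
  · decide
  rcases eq_or_ne zc "78701" with rfl | h3
  · decide
  rcases eq_or_ne zc "02139" with rfl | h4
  · decide
  rcases eq_or_ne zc "60601" with rfl | h5
  · decide
  rcases eq_or_ne zc "77001" with rfl | h6
  · decide
  rcases eq_or_ne zc "85001" with rfl | h7
  · decide
  rcases eq_or_ne zc "98101" with rfl | h8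
  · decide
  rcases eq_or_ne zc "33101" with rfl | h9
  · decide
  rcases eq_or_ne zc "80201" with rfl | h10
  · decide
  rcases eq_or_ne zc "30301" with rfl | h11
  · decide
  rcases eq_or_ne zc "11201" with rfl | h12
  · decide
  rcases eq_or_ne zc "10314" with rfl | h13
  · decide
  rcases eq_or_ne zc "10801" with rfl | h14
  · decide
  rcases eq_or_ne zc "11501" with rfl | h15
  · decide
  rcases eq_or_ne zc "92602" with rfl | h16
  · decide
  rcases eq_or_ne zc "95110" with rfl | h17
  · decide
  simp [zip_to_label_py, zip_to_label_py_alt, pvScanCities, pvScanOverflow,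
    pvCITIES, pvOVERFLOW_ZIPS, pvREVERSE, PySem.Dict.getD, PySem.Dict.get?,
    h12, h13, h14, h15, h16, h17, Ne.symm h0, Ne.symm h1, Ne.symm h2, Ne.symm h3,
    Ne.symm h4, Ne.symm h5, Ne.symm h6, Ne.symm h7, Ne.symm h8, Ne.symm h9,
    Ne.symm h10, Ne.symm h11, Ne.symm h12, Ne.symm h13, Ne.symm h14, Ne.symm h15,
    Ne.symm h16, Ne.symm h17]
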